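-- pv_equiv track=rewrite | github.com/udavdasha/pyCOGNAT | modules_and_scripts/udav_soft.py | vary_motif
-- ===== SOURCE A (Python) =====
-- def vary_motif(motif):
--     motif_code = motif.split("_")[0]
--     coded_motifs = list()
--     coded_motifs.append(motif_code + "_")
--     motif_seq = motif.split("_")[1]
--     variant_reading = False
--     v = 0
--     new_motifs = list()
--     for l in motif_seq:
--         if l == "[":
--             variant_reading = True
--             v = 0
--             new_motifs = list()
--             continue
--         if l == "]":
--             variant_reading = False
--             coded_motifs = new_motifs
--             continue
--         if variant_reading:
--             for m in range(len(coded_motifs)):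
--                 new_motifs.append(coded_motifs[m] + l)
--         else:
--             for m in range(len(coded_motifs)):
--                 coded_motifs[m] += l
--     return coded_motifs
-- ===== SOURCE B (Python) =====
-- def vary_motif(motif):
--     parts = motif.split("_")
--     code = parts[0]
--     seq = parts[1]
--     # Phase 1: tokenize into ordered choice-groups (raises ValueError on malformed brackets).
--     groups = []
--     i = 0
--     n = len(seq)
--     while i < n:
--         c = seq[i]
--         if c == "]":
--             raise ValueError("unmatched ']' in motif")
--         if c == "[":
--             j = i + 1
--             grp = ""
--             while j < n and seq[j] != "]":
--                 if seq[j] == "[":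
--                     raise ValueError("nested '[' in motif")
--                 grp += seq[j]
--                 j += 1
--             if j == n:
--                 raise ValueError("unclosed '[' in motif")
--             groups.append(grp)
--             i = j + 1
--         else:
--             groups.append(c)
--             i += 1
--     # Phase 2: fold over the groups (letter loop outer, results inner — A's order).
--     results = [code + "_"]
--     for grp in groups:
--         results = [r + ch for ch in grp for r in results]
--     return results
-- ===== Notes on version B (the rewrite author's own statement) =====
-- stated objective: alternative
-- what changed: A's one-pass character state machine (variant_reading flag, coded/new lists swapped at brackets) is replaced by a two-phase decomposition: tokenize the post-underscore segment into ordered choice-groups, then fold a single combination-expansion step over the groups; B raises ValueError on malformed brackets instead of reproducing A's state-machine reset artefacts, which Pre_ excludes.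
-- outside the precondition, e.g. on vary_motif('X_A]'): A returns [], B raises ValueError; on vary_motif('X_[A'): A returns ['X_'], B raises ValueError; on vary_motif('X_[A[B]'): A returns ['X_B'], B raises ValueError
import Mathlib
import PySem

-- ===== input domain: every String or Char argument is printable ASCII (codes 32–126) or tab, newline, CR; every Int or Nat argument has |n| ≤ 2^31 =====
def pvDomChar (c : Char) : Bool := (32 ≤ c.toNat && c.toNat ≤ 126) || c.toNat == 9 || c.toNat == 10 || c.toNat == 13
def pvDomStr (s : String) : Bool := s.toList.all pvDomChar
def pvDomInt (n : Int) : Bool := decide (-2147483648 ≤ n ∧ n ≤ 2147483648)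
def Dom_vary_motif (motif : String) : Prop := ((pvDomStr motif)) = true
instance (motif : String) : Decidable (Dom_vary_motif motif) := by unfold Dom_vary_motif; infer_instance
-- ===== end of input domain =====

-- B re-implements A as tokenize-then-fold over choice groups (same values on well-bracketed motifs;
-- B raises ValueError on malformed brackets, which Pre_ excludes). Objective: alternative decomposition.

-- ===== PORT A =====
-- one step of A's state machine: state = (coded_motifs, variant_reading, new_motifs)
def pvStepA (st : List String × Bool × List String) (l : Char) : List String × Bool × List String :=
  if l = '[' then (st.1, true, [])
  else if l = ']' then (st.2.2, false, st.2.2)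
  else if st.2.1 then (st.1, true, st.2.2 ++ st.1.map (fun s => s.push l))
  else (st.1.map (fun s => s.push l), st.2.1, st.2.2)

def vary_motif (motif : String) : List String :=
  let parts := (PySem.Str.split? motif "_").getD []
  match PySem.List.pyGet? parts 0, PySem.List.pyGet? parts 1 with
  | some code, some seq =>
      (seq.toList.foldl pvStepA ([code ++ "_"], false, ([] : List String))).1
  | _, _ => []   -- IndexError in Python (no '_'): outside Pre_

-- ===== PORT B =====
-- grab one bracket group: chars up to the first ']' (none = unclosed '[' or nested '[', where Source B raises)
def pvGrab : List Char → Option (List Char × List Char)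
  | [] => none
  | c :: rest =>
    if c = ']' then some ([], rest)
    else if c = '[' then none
    else (pvGrab rest).map (fun gr => (c :: gr.1, gr.2))

theorem pvGrab_len : ∀ (l : List Char) (g r : List Char), pvGrab l = some (g, r) → r.length ≤ l.length := by
  intro l
  induction l with
  | nil => intro g r h; simp [pvGrab] at h
  | cons c rest ih =>
    intro g r h
    simp only [pvGrab] at h
    by_cases h1 : c = ']'
    · rw [if_pos h1] at h
      simp only [Option.some_inj, Prod.mk.injEq] at h
      obtain ⟨-, hr⟩ := h
      subst hr; simp
    · rw [if_neg h1] at h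
      by_cases h2 : c = '['
      · rw [if_pos h2] at h; simp at h
      · rw [if_neg h2, Option.map_eq_some_iff] at h
        obtain ⟨⟨g', r'⟩, hg, he⟩ := h
        have hl := ih g' r' hg
        have hr : r' = r := congrArg Prod.snd he
        subst hr; simp; omega

-- tokenize: each literal char is a one-element group, each [..] a multi-element group (none = ValueError)
def pvTokenize : List Char → Option (List (List Char))
  | [] => some []
  | c :: rest =>
    if c = ']' then none
    else if c = '[' then
      match _hgr : pvGrab rest with
      | none => none
      | some (g, r) => (pvTokenize r).map (g :: ·)
    else (pvTokenize rest).map (fun gs => [c] :: gs)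
termination_by l => l.length
decreasing_by
  · have := pvGrab_len rest _ _ _hgr; simp; omega
  · simp

-- one fold step of B: [r + ch for ch in grp for r in results]
def pvStepB (results : List String) (grp : List Char) : List String :=
  grp.flatMap (fun ch => results.map (fun r => r.push ch))

def vary_motif_alt (motif : String) : List String :=
  let parts := (PySem.Str.split? motif "_").getD []
  match PySem.List.pyGet? parts 0 with
  | none => []   -- IndexError in Python (no parts[0]): outside Pre_
  | some code =>
    match PySem.List.pyGet? parts 1 with
    | none => []   -- IndexError in Python (no '_'): outside Pre_
    | some seq =>
      match pvTokenize seq.toList with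
      | some gs => gs.foldl pvStepB [code ++ "_"]
      | none => []   -- Source B raises ValueError here: outside Pre_

-- ===== PRECONDITION & SPEC =====
-- Pre_ excludes (a) motifs without '_' (A raises IndexError) and (b) motifs whose second '_'-segment has
-- malformed brackets (a closing bracket with no group open, an unclosed or a nested group): there A's state-machine resets yield
-- accidental values and the natural B raises ValueError. Well-bracketedness is stated in closed form:
-- bracket counts balance overall and on every prefix close-count ≤ open-count ≤ close-count + 1 (no nesting).
def Pre_vary_motif (motif : String) : Prop :=
  2 ≤ ((PySem.Str.split? motif "_").getD []).length ∧
  (((PySem.List.pyGet? ((PySem.Str.split? motif "_").getD []) 1).getD "").toList.count '[' =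
     ((PySem.List.pyGet? ((PySem.Str.split? motif "_").getD []) 1).getD "").toList.count ']') ∧
  ∀ p ∈ ((PySem.List.pyGet? ((PySem.Str.split? motif "_").getD []) 1).getD "").toList.inits,
    p.count ']' ≤ p.count '[' ∧ p.count '[' ≤ p.count ']' + 1
instance (motif : String) : Decidable (Pre_vary_motif motif) := by unfold Pre_vary_motif; infer_instance

def pvWitness_vary_motif : String := "X_A[BC]"

def Spec_vary_motif (motif : String) (out : List String) : Prop := out = vary_motif_alt motif
instance (motif : String) (out : List String) : Decidable (Spec_vary_motif motif out) := by unfold Spec_vary_motif; infer_instance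

-- ===== CLAIM (what is proved, stated in full; the proofs are below) =====
def Claim_equal_vary_motif : Prop := ∀ (motif : String), Dom_vary_motif motif → Pre_vary_motif motif → Spec_vary_motif motif (vary_motif motif)

-- ===== LEMMAS AND PROOFS =====

-- the bracket state machine as a two-state recogniser, used only inside the proofs
mutual
def pvWF : List Char → Bool
  | [] => true
  | c :: rest => if c = ']' then false else if c = '[' then pvWFIn rest else pvWF rest
def pvWFIn : List Char → Bool
  | [] => false
  | c :: rest => if c = ']' then pvWF rest else if c = '[' then false else pvWFIn rest
end

-- Pre_'s closed-form prefix-count condition implies the recogniser accepts (depth 0 / depth 1 halves)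
theorem pvCountsWF : ∀ cs : List Char,
    ((∀ p : List Char, p <+: cs → p.count ']' ≤ p.count '[' ∧ p.count '[' ≤ p.count ']' + 1) →
       cs.count '[' = cs.count ']' → pvWF cs = true)
  ∧ ((∀ p : List Char, p <+: cs → p.count ']' ≤ p.count '[' + 1 ∧ p.count '[' ≤ p.count ']') →
       cs.count '[' + 1 = cs.count ']' → pvWFIn cs = true) := by
  intro cs
  induction cs with
  | nil =>
    refine ⟨fun _ _ => rfl, fun _ htot => ?_⟩
    simp at htot
  | cons c r ih =>
    constructor
    · intro H htot
      by_cases h1 : c = ']'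
      · have := (H [c] (by simp)).1
        subst h1; simp at this
      · by_cases h2 : c = '['
        · subst h2
          simp only [pvWF, if_neg (by decide : ¬ ('[' = ']'))]
          apply ih.2
          · intro p hp
            have := H ('[' :: p) (List.cons_prefix_cons.mpr ⟨rfl, hp⟩)
            simp at this
            constructor <;> omega
          · simp at htot
            omega
        · simp only [pvWF, if_neg h1, if_neg h2]
          apply ih.1
          · intro p hp
            have := H (c :: p) (List.cons_prefix_cons.mpr ⟨rfl, hp⟩)
            simpa [h1, h2] using this
          · simp [h1, h2] at htot
            omega
    · intro H htot
      by_cases h1 : c = ']'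
      · subst h1
        simp only [pvWFIn]
        apply ih.1
        · intro p hp
          have := H (']' :: p) (List.cons_prefix_cons.mpr ⟨rfl, hp⟩)
          simp at this
          constructor <;> omega
        · simp at htot
          omega
      · by_cases h2 : c = '['
        · have := (H [c] (by simp)).2
          subst h2; simp at this
        · simp only [pvWFIn, if_neg h1, if_neg h2]
          apply ih.2
          · intro p hp
            have := H (c :: p) (List.cons_prefix_cons.mpr ⟨rfl, hp⟩)
            simpa [h1, h2] using this
          · simp [h1, h2] at htot
            omega

-- inside a bracket group, A accumulates new_motifs = newm ++ (letters so far).flatMap (coded.map push);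
-- at ']' it swaps that in as coded_motifs and continues not-reading
theorem pvInner : ∀ (l : List Char), pvWFIn l = true → ∀ (coded newm : List String),
    ∃ g r, pvGrab l = some (g, r) ∧ pvWF r = true ∧
      List.foldl pvStepA (coded, true, newm) l =
      List.foldl pvStepA (newm ++ pvStepB coded g, false, newm ++ pvStepB coded g) r := by
  intro l
  induction l with
  | nil => intro h; simp [pvWFIn] at h
  | cons c rest ih =>
    intro h coded newm
    by_cases h1 : c = ']'
    · subst h1
      simp only [pvWFIn] at h
      refine ⟨[], rest, by simp [pvGrab], by simpa using h, ?_⟩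
      simp [List.foldl_cons, pvStepA, pvStepB]
    · by_cases h2 : c = '['
      · subst h2; simp [pvWFIn, h1] at h
      · simp only [pvWFIn, if_neg h1, if_neg h2] at h
        obtain ⟨g, r, hg, hwf, hfold⟩ := ih h coded (newm ++ coded.map (fun s => s.push c))
        refine ⟨c :: g, r, by simp [pvGrab, h1, h2, hg], hwf, ?_⟩
        have hstep : pvStepA (coded, true, newm) c
            = (coded, true, newm ++ coded.map (fun s => s.push c)) := by
          simp [pvStepA, h1, h2]
        have hN : newm ++ coded.map (fun s => s.push c) ++ pvStepB coded g
            = newm ++ pvStepB coded (c :: g) := by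
          simp [pvStepB, List.append_assoc]
        rw [List.foldl_cons, hstep, hfold, hN]

-- main invariant: on a well-bracketed char list, A's machine from a not-reading state computes
-- exactly B's fold over the token groups
theorem pvMain : ∀ (n : Nat) (cs : List Char), cs.length ≤ n → pvWF cs = true →
    ∀ (coded newm : List String),
      ∃ gs, pvTokenize cs = some gs ∧
        (List.foldl pvStepA (coded, false, newm) cs).1 = gs.foldl pvStepB coded := by
  intro n
  induction n with
  | zero =>
    intro cs hlen _ coded newm
    have : cs = [] := List.eq_nil_of_length_eq_zero (Nat.le_zero.mp hlen)
    subst this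
    exact ⟨[], by simp [pvTokenize], rfl⟩
  | succ n ih =>
    intro cs hlen hwf coded newm
    cases cs with
    | nil => exact ⟨[], by simp [pvTokenize], rfl⟩
    | cons c rest =>
      by_cases h1 : c = ']'
      · subst h1; simp [pvWF] at hwf
      · by_cases h2 : c = '['
        · subst h2
          simp only [pvWF, if_neg (by decide : ¬ ('[' = ']'))] at hwf
          obtain ⟨g, r, hg, hwfr, hfold⟩ := pvInner rest hwf coded []
          have hrlen : r.length ≤ n := by
            have := pvGrab_len rest g r hg
            simp at hlen; omega
          obtain ⟨gs, htok, hres⟩ := ih r hrlen hwfr (pvStepB coded g) (pvStepB coded g)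
          refine ⟨g :: gs, ?_, ?_⟩
          · simp only [pvTokenize]
            split_ifs
            split
            · next heq => rw [hg] at heq; exact absurd heq (by simp)
            · next g' r' heq =>
                rw [hg] at heq
                injection heq with heq'
                injection heq' with hgg hrr
                subst hgg; subst hrr
                rw [htok]; rfl
          · have hstep : pvStepA (coded, false, newm) '[' = (coded, true, []) := by
              simp [pvStepA]
            rw [List.foldl_cons, hstep, hfold]
            simp only [List.nil_append] at *
            rw [hres, List.foldl_cons]
        · simp only [pvWF, if_neg h1, if_neg h2] at hwf
          have hlen' : rest.length ≤ n := by simp at hlen; omega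
          obtain ⟨gs, htok, hres⟩ := ih rest hlen' hwf (coded.map (fun s => s.push c)) newm
          refine ⟨[c] :: gs, ?_, ?_⟩
          · simp only [pvTokenize, if_neg h1, if_neg h2, htok]; rfl
          · have hstep : pvStepA (coded, false, newm) c
                = (coded.map (fun s => s.push c), false, newm) := by
              simp [pvStepA, h1, h2]
            rw [List.foldl_cons, hstep, hres, List.foldl_cons]
            simp [pvStepB]

-- ===== VERDICT (by name: the statement is the Claim_ definition above) =====
theorem vary_motif_spec : Claim_equal_vary_motif := by
  intro motif _ hpre
  obtain ⟨hlen, htot, hpref⟩ := hpre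
  unfold Spec_vary_motif
  simp only [vary_motif, vary_motif_alt]
  rcases hp : (PySem.Str.split? motif "_").getD [] with - | ⟨p0, - | ⟨p1, t⟩⟩
  · rw [hp] at hlen; simp at hlen
  · rw [hp] at hlen; simp at hlen
  · rw [hp] at htot hpref
    simp only [pysem, List.getElem?_cons_zero, List.getElem?_cons_succ, Option.getD_some]
      at htot hpref ⊢
    have hwf : pvWF p1.toList = true :=
      (pvCountsWF p1.toList).1 (fun p hp' => hpref p ((List.mem_inits p p1.toList).mpr hp')) htot
    obtain ⟨gs, htok, hres⟩ := pvMain p1.toList.length p1.toList le_rfl hwf [p0 ++ "_"] []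
    rw [htok, hres]
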